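-- pv_equiv track=rewrite | github.com/Leoonnardo/CarlitosExtremo | Corte 1/poda.py | podar
-- ===== SOURCE A (Python) =====
-- def podar(individuos, tamPoblacionMaxima):
--     #breakpoint()
--
--     i = len(individuos) - 1
--
--     while i > 0:
--         if len(individuos) > tamPoblacionMaxima:
--             individuos.pop(i)
--         else:
--             break
--         i -= 1
--     return individuos
-- ===== SOURCE B (Python) =====
-- def podar(individuos, tamPoblacionMaxima):
--     k = max(1, tamPoblacionMaxima)
--     del individuos[k:]
--     return individuos
-- ===== Notes on version B (the rewrite author's own statement) =====
-- stated objective: simpler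
-- what changed: Replaces the index-counting while loop that pops elements one by one with a single cutoff k = max(1, tamPoblacionMaxima) and one in-place tail deletion del individuos[k:] (one bulk operation instead of a per-element pop loop).
import Mathlib
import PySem

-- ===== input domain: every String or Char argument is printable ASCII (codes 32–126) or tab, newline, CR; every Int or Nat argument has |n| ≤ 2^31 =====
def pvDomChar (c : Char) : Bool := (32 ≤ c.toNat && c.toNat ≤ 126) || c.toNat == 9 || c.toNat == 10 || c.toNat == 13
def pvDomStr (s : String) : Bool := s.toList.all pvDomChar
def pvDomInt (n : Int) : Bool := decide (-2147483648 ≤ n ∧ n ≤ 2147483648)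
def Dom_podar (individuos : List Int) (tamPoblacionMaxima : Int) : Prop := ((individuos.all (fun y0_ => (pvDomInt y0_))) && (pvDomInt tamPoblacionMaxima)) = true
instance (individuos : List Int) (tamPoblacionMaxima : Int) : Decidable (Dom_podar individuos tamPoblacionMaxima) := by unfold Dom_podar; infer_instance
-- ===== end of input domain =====

-- B replaces A's element-by-element pop loop with one cutoff and a single tail deletion (same in-place mutation of the list in Python); objective: simpler.
-- ===== PORT A =====
-- while i > 0: if len(individuos) > tam: individuos.pop(i); i -= 1; else break
def podarLoop (xs : List Int) (tam : Int) (i : Int) : List Int :=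
  if _h : i > 0 then
    if (xs.length : Int) > tam then
      match PySem.List.pop? xs i with
      | some (_, ys) => podarLoop ys tam (i - 1)
      | none => xs      -- unreachable: i is always a valid index here
    else xs
  else xs
termination_by i.toNat
decreasing_by omega

def podar (individuos : List Int) (tamPoblacionMaxima : Int) : List Int :=
  podarLoop individuos tamPoblacionMaxima ((individuos.length : Int) - 1)

-- ===== PORT B =====
-- k = max(1, tam); del individuos[k:]; return individuos  (keep the first k elements)
def podar_alt (individuos : List Int) (tamPoblacionMaxima : Int) : List Int :=
  individuos.take (max 1 tamPoblacionMaxima).toNat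

-- ===== PRECONDITION & SPEC =====
def Spec_podar (individuos : List Int) (tamPoblacionMaxima : Int) (out : List Int) : Prop := out = podar_alt individuos tamPoblacionMaxima
instance (individuos : List Int) (tamPoblacionMaxima : Int) (out : List Int) : Decidable (Spec_podar individuos tamPoblacionMaxima out) := by unfold Spec_podar; infer_instance

-- ===== CLAIM (what is proved, stated in full; the proofs are below) =====
def Claim_equal_podar : Prop := ∀ (individuos : List Int) (tamPoblacionMaxima : Int), Dom_podar individuos tamPoblacionMaxima → Spec_podar individuos tamPoblacionMaxima (podar individuos tamPoblacionMaxima)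

-- ===== LEMMAS AND PROOFS =====

-- ===== VERDICT (by name: the statement is the Claim_ definition above) =====
lemma podarLoop_eq (tam : Int) (n : Nat) : ∀ (xs : List Int), xs.length = n + 1 →
    podarLoop xs tam (n : Int) = xs.take (max 1 tam).toNat := by
  induction n with
  | zero =>
    intro xs h
    unfold podarLoop
    rw [dif_neg (by omega : ¬ ((0:Nat):Int) > 0)]
    symm
    exact List.take_of_length_le (by omega)
  | succ m ih =>
    intro xs h
    unfold podarLoop
    rw [dif_pos (by push_cast; omega)]
    by_cases hlen : (xs.length : Int) > tam
    · rw [if_pos hlen]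
      have hidx : (m + 1 : Nat) < xs.length := by omega
      have hp := PySem.List.pop?_natCast (xs := xs) (n := m + 1) hidx
      rw [show ((m+1 : Nat) : Int) = (m : Int) + 1 by push_cast; ring] at hp
      rw [show ((m+1 : Nat) : Int) = (m : Int) + 1 by push_cast; ring, hp]
      have hlen' : (xs.eraseIdx (m+1)).length = m + 1 := by
        rw [List.length_eraseIdx_of_lt hidx]; omega
      rw [show (m : Int) + 1 - 1 = (m : Int) by ring]
      show podarLoop (xs.eraseIdx (m+1)) tam (m : Int) = _
      rw [ih _ hlen']
      have herase : xs.eraseIdx (m+1) = xs.take (m+1) := by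
        rw [List.eraseIdx_eq_take_drop_succ, List.drop_eq_nil_of_le (by omega), List.append_nil]
      rw [herase, List.take_take]
      congr 1
      have : (max 1 tam).toNat ≤ m + 1 := by omega
      omega
    · rw [if_neg hlen]
      symm
      exact List.take_of_length_le (by omega)

theorem podar_spec : Claim_equal_podar := by
  intro xs tam _
  unfold Spec_podar podar podar_alt
  cases hx : xs with
  | nil => unfold podarLoop; simp
  | cons a l =>
    have h : xs.length = l.length + 1 := by rw [hx]; simp
    have := podarLoop_eq tam l.length xs h
    rw [← hx, h]
    push_cast
    rw [show (l.length : Int) + 1 - 1 = (l.length : Int) by ring]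
    exact this
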